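-- pv_equiv track=rewrite | github.com/GTDGit/gtd_api | scripts/parse_alterra_catalog.py | format_rupiah
-- ===== SOURCE A (Python) =====
-- def format_rupiah(amount):
--     """Format number as Indonesian Rupiah string: 5000 -> '5.000'"""
--     s = str(int(amount))
--     result = []
--     for i, c in enumerate(reversed(s)):
--         if i > 0 and i % 3 == 0:
--             result.append(".")
--         result.append(c)
--     return "".join(reversed(result))
-- ===== SOURCE B (Python) =====
-- def format_rupiah(amount):
--     """Format number as Indonesian Rupiah string: 5000 -> '5.000'"""
--     return f"{int(amount):,}".replace(",", ".")
-- ===== Notes on version B (the rewrite author's own statement) =====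
-- stated objective: idiomatic
-- what changed: B replaces A's manual reverse-enumerate-append-reverse digit loop with Python's built-in thousands-grouping format spec (f"{n:,}") followed by a comma-to-dot replace.
-- intended difference: For negative amounts whose absolute value has a multiple-of-three digit count (100..999, 100000..999999, 100000000..999999999 within the domain), A groups the '-' sign as if it were a digit and returns a stray separator after it (e.g. -100 -> '-.100'), while B returns the intended '-100'. — e.g. on format_rupiah(-100): A returns "-.100", B returns "-100"
import Mathlib
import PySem

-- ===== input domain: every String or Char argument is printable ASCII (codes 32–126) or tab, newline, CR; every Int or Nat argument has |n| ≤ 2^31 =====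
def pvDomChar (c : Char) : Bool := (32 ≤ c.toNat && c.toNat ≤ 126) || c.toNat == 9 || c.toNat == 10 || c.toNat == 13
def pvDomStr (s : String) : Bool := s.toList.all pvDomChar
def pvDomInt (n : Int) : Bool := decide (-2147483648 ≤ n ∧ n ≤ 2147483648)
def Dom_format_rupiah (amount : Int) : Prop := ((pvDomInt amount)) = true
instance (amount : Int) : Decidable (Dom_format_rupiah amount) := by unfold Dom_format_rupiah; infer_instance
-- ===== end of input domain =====

-- B formats with Python's thousands-grouping format spec (sign + 3-digit groups) instead of
-- A's manual reverse/enumerate/append/reverse loop; on negative amounts whose absolute value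
-- has a multiple-of-three digit count A emits a stray '.' after the '-' (see D_), B does not.

-- ===== PORT A =====
-- loop body of A's `for i, c in enumerate(reversed(s)): if i > 0 and i % 3 == 0: …`
def pvStepA (acc : List Char) (ic : Int × Char) : List Char :=
  (if ic.1 > 0 ∧ PySem.Int.mod ic.1 3 = 0 then acc ++ ['.'] else acc) ++ [ic.2]

def format_rupiah (amount : Int) : String :=
  let s := PySem.Int.toStr amount
  let result := (PySem.List.enumerate s.toList.reverse 0).foldl pvStepA []
  String.mk result.reverse

-- ===== PORT B =====
-- f"{amount:,}" = the sign, then the digits of |amount| in groups of three from the right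
-- separated by ','; `.replace(",", ".")` turns each separator into '.'.
def pvGroups (l : List Char) : List (List Char) :=
  if l = [] then [] else l.take 3 :: pvGroups (l.drop 3)
termination_by l.length
decreasing_by
  rename_i h
  cases l with
  | nil => exact absurd rfl h
  | cons a t => simp only [List.length_drop, List.length_cons]; omega

def pvJoinDots : List (List Char) → List Char
  | [] => []
  | [g] => g
  | g :: g' :: gs => g ++ '.' :: pvJoinDots (g' :: gs)

def format_rupiah_alt (amount : Int) : String :=
  let digits := PySem.Int.toChars (if amount < 0 then -amount else amount)
  let groups := ((pvGroups digits.reverse).map List.reverse).reverse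
  String.mk ((if amount < 0 then ['-'] else []) ++ pvJoinDots groups)

-- ===== PRECONDITION & SPEC =====
-- On negative amounts whose absolute value has a digit count divisible by 3, A treats the
-- '-' sign as one more digit position and returns a stray separator right after it
-- (A(-100) = '-.100'), while B returns the intended '-100'.
def D_format_rupiah (amount : Int) : Prop :=
  amount < 0 ∧ ((100 ≤ -amount ∧ -amount ≤ 999) ∨ (100000 ≤ -amount ∧ -amount ≤ 999999) ∨
    (100000000 ≤ -amount ∧ -amount ≤ 999999999))
instance (amount : Int) : Decidable (D_format_rupiah amount) := by
  unfold D_format_rupiah; infer_instance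

def Spec_format_rupiah (amount : Int) (out : String) : Prop :=
  ¬ D_format_rupiah amount → out = format_rupiah_alt amount
instance (amount : Int) (out : String) : Decidable (Spec_format_rupiah amount out) := by
  unfold Spec_format_rupiah; infer_instance

def pvDiffWitness_format_rupiah : Int := -100
def pvDiffWitnessOut_format_rupiah : String × String := ("-.100", "-100")

-- ===== CLAIM (what is proved, stated in full; the proofs are below) =====
def Claim_unchanged_format_rupiah : Prop := ∀ (amount : Int), Dom_format_rupiah amount → Spec_format_rupiah amount (format_rupiah amount)
def Claim_changed_format_rupiah : Prop := Dom_format_rupiah (pvDiffWitness_format_rupiah) ∧ D_format_rupiah (pvDiffWitness_format_rupiah) ∧ format_rupiah (pvDiffWitness_format_rupiah) = pvDiffWitnessOut_format_rupiah.1 ∧ format_rupiah_alt (pvDiffWitness_format_rupiah) = pvDiffWitnessOut_format_rupiah.2 ∧ pvDiffWitnessOut_format_rupiah.1 ≠ pvDiffWitnessOut_format_rupiah.2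
def Claim_exact_format_rupiah : Prop := ∀ (amount : Int), Dom_format_rupiah amount → D_format_rupiah amount → format_rupiah amount ≠ format_rupiah_alt amount

-- ===== LEMMAS AND PROOFS =====

-- the dotted join of B's grouping, applied to a reversed digit list
def pvI (cs : List Char) : List Char := pvJoinDots (pvGroups cs)

theorem pvGroups_nil : pvGroups [] = [] := by
  rw [pvGroups]; simp

theorem pvGroups_eq_nil_iff (l : List Char) : pvGroups l = [] ↔ l = [] := by
  constructor
  · intro h
    by_contra hn
    rw [pvGroups, if_neg hn] at h
    exact List.cons_ne_nil _ _ h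
  · intro h; subst h; rw [pvGroups]; simp

theorem pvGroups_cons3 (a b c : Char) (rest : List Char) :
    pvGroups (a :: b :: c :: rest) = [a, b, c] :: pvGroups rest := by
  rw [pvGroups]; simp

theorem pvJoinDots_cons (g : List Char) (gs : List (List Char)) :
    pvJoinDots (g :: gs) = g ++ (if gs = [] then [] else '.' :: pvJoinDots gs) := by
  cases gs <;> simp [pvJoinDots]

theorem pvJoinDots_concat (gs : List (List Char)) (g : List Char) (h : gs ≠ []) :
    pvJoinDots (gs ++ [g]) = pvJoinDots gs ++ '.' :: g := by
  induction gs with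
  | nil => exact absurd rfl h
  | cons x xs ih =>
    cases xs with
    | nil => simp [pvJoinDots]
    | cons y ys =>
      have hxs := ih (List.cons_ne_nil _ _)
      simp only [List.cons_append, pvJoinDots] at hxs ⊢
      simp [hxs]

theorem pvJoinDots_reverse (gs : List (List Char)) :
    (pvJoinDots gs).reverse = pvJoinDots ((gs.map List.reverse).reverse) := by
  induction gs with
  | nil => simp [pvJoinDots]
  | cons g xs ih =>
    cases xs with
    | nil => simp [pvJoinDots]
    | cons y ys =>
      have ih' : (pvJoinDots (y :: ys)).reverse
          = pvJoinDots ((List.map List.reverse ys).reverse ++ [y.reverse]) := by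
        simpa using ih
      simp only [pvJoinDots, List.map_cons, List.reverse_cons]
      rw [pvJoinDots_concat ((List.map List.reverse ys).reverse ++ [y.reverse])
        g.reverse (by simp), ← ih']
      simp

theorem pvI_one (a : Char) : pvI [a] = [a] := by
  unfold pvI; rw [pvGroups]; simp; rw [pvGroups]; simp [pvJoinDots]

theorem pvI_two (a b : Char) : pvI [a, b] = [a, b] := by
  unfold pvI; rw [pvGroups]; simp; rw [pvGroups]; simp [pvJoinDots]

theorem pvI_cons3 (a b c : Char) (rest : List Char) :
    pvI (a :: b :: c :: rest) =
      a :: b :: c :: (if rest = [] then [] else '.' :: pvI rest) := by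
  unfold pvI
  rw [pvGroups_cons3, pvJoinDots_cons]
  by_cases h : rest = []
  · simp [h, pvGroups_eq_nil_iff]
  · simp [h, (pvGroups_eq_nil_iff rest).not.mpr h]

theorem pvStepA_dot (acc : List Char) (i : Int) (c : Char) (h1 : 0 < i)
    (h2 : PySem.Int.mod i 3 = 0) : pvStepA acc (i, c) = acc ++ ['.', c] := by
  unfold pvStepA
  rw [if_pos ⟨h1, h2⟩]
  simp

theorem pvStepA_nodot (acc : List Char) (i : Int) (c : Char)
    (h : ¬ (3 : Int) ∣ i) : pvStepA acc (i, c) = acc ++ [c] := by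
  have hm : ¬ (i > 0 ∧ PySem.Int.mod i 3 = 0) := by
    rintro ⟨_, hm⟩
    exact h ((PySem.Int.mod_eq_zero_iff_dvd _ _).mp hm)
  unfold pvStepA
  rw [if_neg hm]

theorem pvStepA_zero (acc : List Char) (c : Char) :
    pvStepA acc ((0 : Int), c) = acc ++ [c] := by
  simp [pvStepA]

theorem pvMod3_eq_zero (j : Nat) : PySem.Int.mod (3 * (j : Int)) 3 = 0 :=
  (PySem.Int.mod_eq_zero_iff_dvd _ _).mpr ⟨(j : Int), by ring⟩

theorem pvFoldA_from (n : Nat) : ∀ (cs : List Char), cs.length ≤ n → ∀ (j : Nat), 1 ≤ j →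
    ∀ (acc : List Char),
    (PySem.List.enumerate cs (3 * (j : Int))).foldl pvStepA acc =
      acc ++ (if cs = [] then [] else '.' :: pvI cs) := by
  induction n with
  | zero =>
    intro cs hlen j hj acc
    cases cs with
    | nil => simp [PySem.List.enumerate_nil]
    | cons a t => simp at hlen
  | succ n ih =>
    intro cs hlen j hj acc
    have hjpos : (0 : Int) < 3 * (j : Int) := by
      have : (1 : Int) ≤ (j : Int) := by exact_mod_cast hj
      omega
    have hmod := pvMod3_eq_zero j
    match cs with
    | [] => simp [PySem.List.enumerate_nil]
    | [a] =>
      simp only [PySem.List.enumerate_cons, PySem.List.enumerate_nil, List.foldl]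
      rw [pvStepA_dot _ _ _ hjpos hmod]
      simp [pvI_one]
    | [a, b] =>
      simp only [PySem.List.enumerate_cons, PySem.List.enumerate_nil, List.foldl]
      rw [pvStepA_dot _ _ _ hjpos hmod]
      rw [pvStepA_nodot _ _ _ (by omega)]
      simp [pvI_two]
    | a :: b :: c :: rest =>
      simp only [PySem.List.enumerate_cons, List.foldl]
      rw [pvStepA_dot _ _ _ hjpos hmod]
      rw [pvStepA_nodot _ _ _ (by omega)]
      rw [pvStepA_nodot _ _ _ (by omega)]
      have hcast : (3 * (j : Int)) + 1 + 1 + 1 = 3 * (((j + 1 : Nat)) : Int) := by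
        push_cast; ring
      rw [hcast]
      rw [ih rest (by simp at hlen; omega) (j + 1) (by omega)]
      rw [pvI_cons3]
      by_cases h : rest = [] <;> simp [h]

theorem pvFoldA_top (cs : List Char) :
    (PySem.List.enumerate cs 0).foldl pvStepA [] = pvI cs := by
  match cs with
  | [] => simp [PySem.List.enumerate_nil, pvI, pvGroups_nil, pvJoinDots]
  | [a] =>
    simp only [PySem.List.enumerate_cons, PySem.List.enumerate_nil, List.foldl]
    rw [pvStepA_zero]
    simp [pvI_one]
  | [a, b] =>
    simp only [PySem.List.enumerate_cons, PySem.List.enumerate_nil, List.foldl]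
    rw [pvStepA_zero]
    rw [pvStepA_nodot _ _ _ (by omega)]
    simp [pvI_two]
  | a :: b :: c :: rest =>
    simp only [PySem.List.enumerate_cons, List.foldl]
    rw [pvStepA_zero]
    rw [pvStepA_nodot _ _ _ (by omega)]
    rw [pvStepA_nodot _ _ _ (by omega)]
    have hcast : (0 : Int) + 1 + 1 + 1 = 3 * (((1 : Nat)) : Int) := by norm_num
    rw [hcast]
    rw [pvFoldA_from rest.length rest le_rfl 1 le_rfl]
    rw [pvI_cons3]
    by_cases h : rest = [] <;> simp [h]

theorem pvI_reverse (cs : List Char) :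
    (pvI cs).reverse = pvJoinDots (((pvGroups cs).map List.reverse).reverse) := by
  unfold pvI
  exact pvJoinDots_reverse _

theorem pvToChars_nonneg (n : Int) (h : ¬ n < 0) :
    PySem.Int.toChars n = Nat.toDigits 10 n.toNat := by
  simp [PySem.Int.toChars, h]

theorem pvToChars_neg (n : Int) (h : n < 0) :
    PySem.Int.toChars n = '-' :: Nat.toDigits 10 n.natAbs := by
  simp [PySem.Int.toChars, h]

-- the digit count of |amount| is not a multiple of 3 outside D_ (within the domain)
theorem pvNoDvd (amount : Int) (hDom : Dom_format_rupiah amount) (hneg : amount < 0)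
    (hnd : ¬ D_format_rupiah amount) :
    ¬ (3 : Int) ∣ ((Nat.toDigits 10 amount.natAbs).length : Int) := by
  intro hdvd
  have hdvd' : 3 ∣ (Nat.toDigits 10 amount.natAbs).length := by exact_mod_cast hdvd
  have hb : -2147483648 ≤ amount ∧ amount ≤ 2147483648 := by
    simpa [Dom_format_rupiah, pvDomInt] using hDom
  have hm1 : 1 ≤ amount.natAbs := by omega
  have hm2 : amount.natAbs ≤ 2147483648 := by omega
  have hpos : 0 < (Nat.toDigits 10 amount.natAbs).length :=
    Nat.length_toDigits_pos
  have hiff : ∀ e : Nat, 0 < e → ((Nat.toDigits 10 amount.natAbs).length ≤ e ↔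
      amount.natAbs < 10 ^ e) := fun e he => Nat.length_toDigits_le_iff (by norm_num) he
  have h2 := hiff 2 (by norm_num)
  have h3 := hiff 3 (by norm_num)
  have h5 := hiff 5 (by norm_num)
  have h6 := hiff 6 (by norm_num)
  have h8 := hiff 8 (by norm_num)
  have h9 := hiff 9 (by norm_num)
  have h10 := hiff 10 (by norm_num)
  norm_num at h2 h3 h5 h6 h8 h9 h10
  unfold D_format_rupiah at hnd
  omega

-- inside D_ the digit count of |amount| IS a multiple of 3 (within the domain)
theorem pvDvd (amount : Int) (hDom : Dom_format_rupiah amount)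
    (hD : D_format_rupiah amount) : 3 ∣ (Nat.toDigits 10 amount.natAbs).length := by
  have hb : -2147483648 ≤ amount ∧ amount ≤ 2147483648 := by
    simpa [Dom_format_rupiah, pvDomInt] using hDom
  have hiff : ∀ e : Nat, 0 < e → ((Nat.toDigits 10 amount.natAbs).length ≤ e ↔
      amount.natAbs < 10 ^ e) := fun e he => Nat.length_toDigits_le_iff (by norm_num) he
  have h2 := hiff 2 (by norm_num)
  have h3 := hiff 3 (by norm_num)
  have h5 := hiff 5 (by norm_num)
  have h6 := hiff 6 (by norm_num)
  have h8 := hiff 8 (by norm_num)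
  have h9 := hiff 9 (by norm_num)
  unfold D_format_rupiah at hD
  norm_num at h2 h3 h5 h6 h8 h9
  omega

-- ===== VERDICT (by name: the statement is the Claim_ definition above) =====
theorem format_rupiah_spec : Claim_unchanged_format_rupiah := by
  intro amount _hDom hnd
  show format_rupiah amount = format_rupiah_alt amount
  by_cases hneg : amount < 0
  · unfold format_rupiah format_rupiah_alt
    simp only [PySem.Int.toList_toStr, if_pos hneg]
    rw [pvToChars_neg amount hneg]
    have h2 : PySem.Int.toChars (-amount) = Nat.toDigits 10 amount.natAbs := by
      rw [pvToChars_nonneg _ (by omega)]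
      congr 1
      omega
    rw [h2]
    rw [List.reverse_cons]
    rw [PySem.List.enumerate_append, List.foldl_append, pvFoldA_top]
    simp only [PySem.List.enumerate_cons, PySem.List.enumerate_nil, List.foldl]
    rw [pvStepA_nodot _ _ _ (by
      have := pvNoDvd amount _hDom hneg hnd
      simpa using this)]
    rw [List.reverse_append]
    simp only [List.reverse_cons, List.reverse_nil, List.nil_append, List.singleton_append]
    rw [pvI_reverse]
  · unfold format_rupiah format_rupiah_alt
    simp only [PySem.Int.toList_toStr, if_neg hneg]
    rw [pvFoldA_top, pvI_reverse]
    simp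

theorem format_rupiah_changed : Claim_changed_format_rupiah := by
  unfold Claim_changed_format_rupiah
  refine ⟨by decide, by decide, by rfl, ?_, by decide⟩
  have h1 : (PySem.Int.toChars (if (-100 : Int) < 0 then -(-100 : Int) else (-100 : Int))).reverse
      = ['0', '0', '1'] := by decide
  show format_rupiah_alt (-100 : Int) = "-100"
  simp only [format_rupiah_alt, h1]
  rw [pvGroups_cons3, pvGroups_nil]
  decide

theorem format_rupiah_tight : Claim_exact_format_rupiah := by
  intro amount hDom hD
  have hneg : amount < 0 := hD.1
  have hdvd := pvDvd amount hDom hD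
  have hpos : 0 < (Nat.toDigits 10 amount.natAbs).length := Nat.length_toDigits_pos
  unfold format_rupiah format_rupiah_alt
  simp only [PySem.Int.toList_toStr, if_pos hneg]
  rw [pvToChars_neg amount hneg]
  have h2 : PySem.Int.toChars (-amount) = Nat.toDigits 10 amount.natAbs := by
    rw [pvToChars_nonneg _ (by omega)]
    congr 1
    omega
  rw [h2, List.reverse_cons, PySem.List.enumerate_append, List.foldl_append, pvFoldA_top]
  simp only [PySem.List.enumerate_cons, PySem.List.enumerate_nil, List.foldl]
  rw [pvStepA_dot _ _ _ (by simp; exact_mod_cast hpos)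
    (by rw [PySem.Int.mod_eq_zero_iff_dvd]; simp; exact_mod_cast hdvd)]
  rw [List.reverse_append]
  simp only [List.reverse_cons, List.reverse_nil, List.nil_append, List.singleton_append]
  rw [pvI_reverse]
  intro heq
  have hl := String.ofList_inj.mp heq
  have hlen := congrArg List.length hl
  simp at hlen
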